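-- pv_equiv track=rewrite | github.com/HighL0ad/Mafia_Game_for_holbies | host/host.py | get_default_roles_config
-- ===== SOURCE A (Python) =====
-- def get_default_roles_config(num_players):
--     roles_config = {
--         range(1, 6): {"mafia": 1, "don": 0, "doctor": 1, "sheriff": 1, "maniac": 0, "kamikaze": 0},
--         range(6, 11): {"mafia": 2, "don": 0, "doctor": 1, "sheriff": 1, "maniac": 0, "kamikaze": 0},
--         range(11, 16): {"mafia": 3, "don": 1, "doctor": 1, "sheriff": 1, "maniac": 1, "kamikaze": 1},
--         range(16, 21): {"mafia": 4, "don": 1, "doctor": 2, "sheriff": 1, "maniac": 1, "kamikaze": 1},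
--         range(21, 26): {"mafia": 5, "don": 1, "doctor": 2, "sheriff": 2, "maniac": 1, "kamikaze": 1},
--         range(26, 31): {"mafia": 6, "don": 1, "doctor": 2, "sheriff": 2, "maniac": 2, "kamikaze": 1},
--     }
--
--     for player_range, config in roles_config.items():
--         if num_players in player_range:
--             total_special = sum(config.values())
--             config["villager"] = num_players - total_special
--             return config
--
--     return {"mafia": 1, "don": 0, "doctor": 1, "sheriff": 1, "maniac": 0, "kamikaze": 0,
--             "villager": max(0, num_players - 3)}
-- ===== SOURCE B (Python) =====
-- def get_default_roles_config(num_players):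
--     if num_players not in range(1, 31):
--         return {"mafia": 1, "don": 0, "doctor": 1, "sheriff": 1, "maniac": 0,
--                 "kamikaze": 0, "villager": max(0, num_players - 3)}
--     t = int((num_players - 1) // 5)  # tier 0..5
--     config = {
--         "mafia": 1 + t,
--         "don": 1 if t >= 2 else 0,
--         "doctor": 2 if t >= 3 else 1,
--         "sheriff": 2 if t >= 4 else 1,
--         "maniac": (2 if t == 5 else 1) if t >= 2 else 0,
--         "kamikaze": 1 if t >= 2 else 0,
--     }
--     config["villager"] = num_players - sum(config.values())
--     return config
-- ===== Notes on version B (the rewrite author's own statement) =====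
-- stated objective: alternative
-- what changed: Replaced the ordered scan over six range-keyed config dicts with a closed-form tier index t=(num_players-1)//5 and arithmetic/threshold formulas computing each role count, eliminating the table entirely.
import Mathlib
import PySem

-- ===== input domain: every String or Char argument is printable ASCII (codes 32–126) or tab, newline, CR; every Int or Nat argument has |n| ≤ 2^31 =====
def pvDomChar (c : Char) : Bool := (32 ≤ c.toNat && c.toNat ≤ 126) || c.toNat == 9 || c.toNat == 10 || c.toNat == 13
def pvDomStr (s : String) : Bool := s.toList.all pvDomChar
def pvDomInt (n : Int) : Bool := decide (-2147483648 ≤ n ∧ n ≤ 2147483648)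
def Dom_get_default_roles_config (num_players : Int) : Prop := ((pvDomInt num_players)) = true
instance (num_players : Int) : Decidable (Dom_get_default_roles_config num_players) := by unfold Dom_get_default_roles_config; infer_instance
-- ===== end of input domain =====

-- B replaces A's ordered scan over six range-keyed config tables with a closed-form
-- tier index t=(n-1)//5 and threshold formulas for each role count (alternative, no table).

-- ===== PORT A =====
-- A's dict keyed by range objects, in insertion order: ((lo, hi), config)
def pvA_entries : List ((Int × Int) × List (String × Int)) :=
  [((1, 6),  [("mafia", 1), ("don", 0), ("doctor", 1), ("sheriff", 1), ("maniac", 0), ("kamikaze", 0)]),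
   ((6, 11), [("mafia", 2), ("don", 0), ("doctor", 1), ("sheriff", 1), ("maniac", 0), ("kamikaze", 0)]),
   ((11, 16), [("mafia", 3), ("don", 1), ("doctor", 1), ("sheriff", 1), ("maniac", 1), ("kamikaze", 1)]),
   ((16, 21), [("mafia", 4), ("don", 1), ("doctor", 2), ("sheriff", 1), ("maniac", 1), ("kamikaze", 1)]),
   ((21, 26), [("mafia", 5), ("don", 1), ("doctor", 2), ("sheriff", 2), ("maniac", 1), ("kamikaze", 1)]),
   ((26, 31), [("mafia", 6), ("don", 1), ("doctor", 2), ("sheriff", 2), ("maniac", 2), ("kamikaze", 1)])]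

-- the for-loop over roles_config.items(): first range containing num_players wins
def pvA_scan : List ((Int × Int) × List (String × Int)) → Int → Option (List (String × Int))
  | [], _ => none
  | (r, config) :: rest, n =>
    if r.1 ≤ n ∧ n < r.2 then
      -- total_special = sum(config.values()); config["villager"] = n - total_special (new key → appended)
      some (config ++ [("villager", n - (config.map Prod.snd).sum)])
    else pvA_scan rest n

def get_default_roles_config (num_players : Int) : List (String × Int) :=
  match pvA_scan pvA_entries num_players with
  | some config => config
  | none => [("mafia", 1), ("don", 0), ("doctor", 1), ("sheriff", 1), ("maniac", 0),
             ("kamikaze", 0), ("villager", max 0 (num_players - 3))]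

-- ===== PORT B =====
def get_default_roles_config_alt (num_players : Int) : List (String × Int) :=
  if ¬ (1 ≤ num_players ∧ num_players < 31) then
    [("mafia", 1), ("don", 0), ("doctor", 1), ("sheriff", 1), ("maniac", 0),
     ("kamikaze", 0), ("villager", max 0 (num_players - 3))]
  else
    let t := PySem.Int.floordiv (num_players - 1) 5  -- tier 0..5
    let config : List (String × Int) :=
      [("mafia", 1 + t),
       ("don", if 2 ≤ t then 1 else 0),
       ("doctor", if 3 ≤ t then 2 else 1),
       ("sheriff", if 4 ≤ t then 2 else 1),
       ("maniac", if 2 ≤ t then (if t = 5 then 2 else 1) else 0),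
       ("kamikaze", if 2 ≤ t then 1 else 0)]
    config ++ [("villager", num_players - (config.map Prod.snd).sum)]

-- ===== PRECONDITION & SPEC =====
def Spec_get_default_roles_config (num_players : Int) (out : List (String × Int)) : Prop := out = get_default_roles_config_alt num_players
instance (num_players : Int) (out : List (String × Int)) : Decidable (Spec_get_default_roles_config num_players out) := by unfold Spec_get_default_roles_config; infer_instance

-- ===== CLAIM (what is proved, stated in full; the proofs are below) =====
def Claim_equal_get_default_roles_config : Prop := ∀ (num_players : Int), Dom_get_default_roles_config num_players → Spec_get_default_roles_config num_players (get_default_roles_config num_players)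

-- ===== LEMMAS AND PROOFS =====

-- ===== VERDICT (by name: the statement is the Claim_ definition above) =====
theorem get_default_roles_config_spec : Claim_equal_get_default_roles_config := by
  intro n _
  unfold Spec_get_default_roles_config
  by_cases h : 1 ≤ n ∧ n < 31
  · obtain ⟨h1, h2⟩ := h
    interval_cases n <;> decide
  · simp only [get_default_roles_config, get_default_roles_config_alt, pvA_scan, pvA_entries,
      if_pos h]
    split_ifs with c1 c2 c3 c4 c5 c6 <;> simp_all <;> omega
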